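-- pv_equiv track=rewrite | github.com/Penguinbeanie/TSAD_Seminar | Dataset_Creation/preparation_code/sleep_anomaly_identifier.py | identify_anomalies
-- ===== SOURCE A (Python) =====
-- def identify_anomalies(data_values, min_val=60, min_len=7):
--     """
--     Identifies anomalies in a list of data values.
--     Anomalies are sequences of consecutive points < min_val that are longer than min_len.
--     """
--     num_points = len(data_values)
--     predicted_anomalies = [0] * num_points
--
--     i = 0
--     while i < num_points:
--         # Check if current point is below min_val
--         if data_values[i] < min_val:
--             # Found start of a potential sequence - count consecutive points below min_val
--             start_index = i
--             sequence_length = 0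
--
--             # Count all consecutive points below min_val
--             while i < num_points and data_values[i] < min_val:
--                 sequence_length += 1
--                 i += 1
--
--             # Check if sequence length is greater than min_len
--             if sequence_length > min_len:
--                 # Mark all points in this sequence as anomalies
--                 for j in range(start_index, start_index + sequence_length):
--                     predicted_anomalies[j] = 1
--
--             # i is already positioned at the next point after the sequence
--         else:
--             # Point is not below min_val, move to next point
--             i += 1
--
--     return predicted_anomalies
-- ===== SOURCE B (Python) =====
-- def identify_anomalies(data_values, min_val=60, min_len=7):
--     # Dynamic-programming sweeps: left[i] = length of below-threshold streak ending at i,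
--     # right[i] = streak starting at i; point i is anomalous iff left[i]+right[i]-1 > min_len.
--     left = []
--     prev = 0
--     for v in data_values:
--         prev = prev + 1 if v < min_val else 0
--         left.append(prev)
--     right = []
--     nxt = 0
--     for v in reversed(data_values):
--         nxt = nxt + 1 if v < min_val else 0
--         right.append(nxt)
--     right.reverse()
--     return [1 if v < min_val and l + r - 1 > min_len else 0
--             for v, l, r in zip(data_values, left, right)]
-- ===== Notes on version B (the rewrite author's own statement) =====
-- stated objective: alternative
-- what changed: A segments the sequence into maximal below-threshold runs with nested index loops and mutates ranges of a preallocated array; B never locates run boundaries: two dynamic-programming sweeps compute for each position the streak lengths ending and starting there, and each point is marked independently from left[i]+right[i]-1 > min_len.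
import Mathlib
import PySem

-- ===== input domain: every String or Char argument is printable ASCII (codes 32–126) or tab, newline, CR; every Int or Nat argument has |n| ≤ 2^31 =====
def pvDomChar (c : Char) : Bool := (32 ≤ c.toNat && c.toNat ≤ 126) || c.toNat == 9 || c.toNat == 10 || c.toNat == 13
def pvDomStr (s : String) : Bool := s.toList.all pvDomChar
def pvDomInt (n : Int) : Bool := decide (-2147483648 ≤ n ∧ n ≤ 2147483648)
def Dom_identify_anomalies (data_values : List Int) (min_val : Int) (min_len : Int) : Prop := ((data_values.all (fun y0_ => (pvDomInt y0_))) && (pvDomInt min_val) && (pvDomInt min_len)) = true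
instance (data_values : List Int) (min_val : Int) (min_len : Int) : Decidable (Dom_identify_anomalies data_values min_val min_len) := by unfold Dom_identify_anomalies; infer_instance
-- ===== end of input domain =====

-- B replaces A's run-segmentation (nested index loops over a mutated array) by two
-- dynamic-programming sweeps of per-position streak lengths; the return value is proved identical.

-- ===== PORT A =====
-- inner while: 'while i < num_points and data_values[i] < min_val: sequence_length += 1; i += 1'
def countRun (data : List Int) (min_val : Int) (i : Nat) : Nat :=
  if h : i < data.length ∧ data.getD i 0 < min_val then
    countRun data min_val (i + 1) + 1
  else 0
termination_by data.length - i
decreasing_by omega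

-- cited by aLoop's decreasing_by: the inner while advances i by at least one step
theorem countRun_pos (data : List Int) (min_val : Int) (i : Nat)
    (h1 : i < data.length) (h2 : data.getD i 0 < min_val) :
    1 ≤ countRun data min_val i := by
  rw [countRun, dif_pos ⟨h1, h2⟩]; omega

-- 'for j in range(start_index, start_index + sequence_length): predicted_anomalies[j] = 1'
def setOnes (pred : List Int) (j : Nat) (L : Nat) : List Int :=
  match L with
  | 0 => pred
  | L' + 1 => setOnes (pred.set j 1) (j + 1) L'

-- the outer while loop, state = (predicted_anomalies, i)
def aLoop (data : List Int) (min_val min_len : Int) (pred : List Int) (i : Nat) : List Int :=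
  if h : i < data.length then
    if hx : data.getD i 0 < min_val then
      aLoop data min_val min_len
        (if ((countRun data min_val i : Int) > min_len) then
          setOnes pred i (countRun data min_val i)
        else pred)
        (i + countRun data min_val i)
    else
      aLoop data min_val min_len pred (i + 1)
  else pred
termination_by data.length - i
decreasing_by
  · have := countRun_pos data min_val i h hx; omega
  · omega

def identify_anomalies (data_values : List Int) (min_val : Int) (min_len : Int) : List Int :=
  aLoop data_values min_val min_len (List.replicate data_values.length 0) 0

-- ===== PORT B =====
-- 'prev = prev + 1 if v < min_val else 0; left.append(prev)' — one DP sweep of streak lengths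
def scanRuns (min_val : Int) (prev : Int) : List Int → List Int
  | [] => []
  | x :: xs =>
    let c := if x < min_val then prev + 1 else 0
    c :: scanRuns min_val c xs

def identify_anomalies_alt (data_values : List Int) (min_val : Int) (min_len : Int) : List Int :=
  let left := scanRuns min_val 0 data_values
  let right := (scanRuns min_val 0 data_values.reverse).reverse
  (data_values.zip (left.zip right)).map
    (fun p => if p.1 < min_val ∧ p.2.1 + p.2.2 - 1 > min_len then (1 : Int) else 0)

-- ===== PRECONDITION & SPEC =====
def Spec_identify_anomalies (data_values : List Int) (min_val : Int) (min_len : Int) (out : List Int) : Prop := out = identify_anomalies_alt data_values min_val min_len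
instance (data_values : List Int) (min_val : Int) (min_len : Int) (out : List Int) : Decidable (Spec_identify_anomalies data_values min_val min_len out) := by unfold Spec_identify_anomalies; infer_instance

-- ===== CLAIM =====
def Claim_equal_identify_anomalies : Prop := ∀ (data_values : List Int) (min_val : Int) (min_len : Int), Dom_identify_anomalies data_values min_val min_len → Spec_identify_anomalies data_values min_val min_len (identify_anomalies data_values min_val min_len)

-- ===== LEMMAS AND PROOFS =====

-- proof-only intermediate: the run-segmentation view both programs are compared against
def bGo (min_val min_len : Int) (l : List Int) : List Int :=
  match l with
  | [] => []
  | x :: xs =>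
    let key := decide (x < min_val)
    let run := (x :: xs).takeWhile (fun y => decide (y < min_val) == key)
    let rest := (x :: xs).dropWhile (fun y => decide (y < min_val) == key)
    List.replicate run.length (if key && decide ((run.length : Int) > min_len) then (1 : Int) else 0)
      ++ bGo min_val min_len rest
termination_by l.length
decreasing_by
  have := List.length_dropWhile_le (fun y => decide (y < min_val) == decide (x < min_val)) xs
  simp
  omega

theorem countRun_eq (data : List Int) (min_val : Int) :
    ∀ k i, data.length - i ≤ k →
      countRun data min_val i
        = ((data.drop i).takeWhile (fun y => decide (y < min_val))).length := by
  intro k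
  induction k with
  | zero =>
    intro i hk
    rw [countRun, dif_neg (by omega), List.drop_of_length_le (by omega)]
    simp
  | succ k ih =>
    intro i hk
    by_cases h1 : i < data.length
    · have hdrop : data.drop i = data[i] :: data.drop (i + 1) := List.drop_eq_getElem_cons h1
      have hg : data.getD i 0 = data[i] := by
        simp [List.getD_eq_getElem?_getD, List.getElem?_eq_getElem h1]
      by_cases h2 : data.getD i 0 < min_val
      · have hx' : data[i] < min_val := by rw [← hg]; exact h2
        rw [countRun, dif_pos ⟨h1, h2⟩, hdrop, List.takeWhile_cons_of_pos (p := fun y => decide (y < min_val)) (decide_eq_true hx'),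
          ih (i + 1) (by omega)]
        simp
      · have hx' : ¬ data[i] < min_val := by rw [← hg]; exact h2
        rw [countRun, dif_neg (by tauto), hdrop,
          List.takeWhile_cons_of_neg (p := fun y => decide (y < min_val)) (by simpa using hx')]
        simp
    · rw [countRun, dif_neg (by omega), List.drop_of_length_le (by omega)]
      simp

theorem dropWhile_eq_drop_len (p : Int → Bool) (l : List Int) :
    l.dropWhile p = l.drop (l.takeWhile p).length := by
  induction l with
  | nil => rfl
  | cons x xs ih =>
    by_cases h : p x
    · simp [h, ih]
    · simp [h]

theorem setOnes_shift (L : Nat) :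
    ∀ (front : List Int) (m : Nat), L ≤ m →
      setOnes (front ++ List.replicate m (0 : Int)) front.length L
        = front ++ List.replicate L 1 ++ List.replicate (m - L) 0 := by
  induction L with
  | zero => intro front m _; simp [setOnes]
  | succ L ih =>
    intro front m hLm
    obtain ⟨m', rfl⟩ : ∃ m', m = m' + 1 := ⟨m - 1, by omega⟩
    rw [List.replicate_succ, setOnes]
    have hset : (front ++ (0 : Int) :: List.replicate m' 0).set front.length 1
        = (front ++ [1]) ++ List.replicate m' 0 := by
      rw [List.set_append]
      simp
    have hlen : front.length + 1 = (front ++ [(1 : Int)]).length := by simp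
    rw [hset, hlen, ih (front ++ [1]) m' (by omega)]
    simp [List.replicate_succ, List.append_assoc, Nat.succ_sub_succ]

theorem bGo_cons_not (min_val min_len x : Int) (xs : List Int) (hx : ¬ x < min_val) :
    bGo min_val min_len (x :: xs) = 0 :: bGo min_val min_len xs := by
  have hkey : decide (x < min_val) = false := by simp [hx]
  cases xs with
  | nil => simp [bGo, hkey]
  | cons y ys =>
    by_cases hy : y < min_val
    · have hky : decide (y < min_val) = true := by simp [hy]
      rw [bGo]
      simp [hkey, hky]
    · have hky : decide (y < min_val) = false := by simp [hy]
      rw [bGo, bGo]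
      simp [hkey, hky, List.replicate_succ]

theorem aLoop_bGo (data : List Int) (min_val min_len : Int) :
    ∀ k i (front : List Int), front.length = i → i ≤ data.length → data.length - i ≤ k →
      aLoop data min_val min_len (front ++ List.replicate (data.length - i) 0) i
        = front ++ bGo min_val min_len (data.drop i) := by
  intro k
  induction k with
  | zero =>
    intro i front hf hi hk
    rw [aLoop, dif_neg (by omega), List.drop_of_length_le (by omega)]
    have : data.length - i = 0 := by omega
    simp [this, bGo]
  | succ k ih =>
    intro i front hf hi hk
    by_cases h1 : i < data.length
    · have hdrop : data.drop i = data[i] :: data.drop (i + 1) := List.drop_eq_getElem_cons h1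
      have hg : data.getD i 0 = data[i] := by
        simp [List.getD_eq_getElem?_getD, List.getElem?_eq_getElem h1]
      by_cases h2 : data.getD i 0 < min_val
      · have hx' : data[i] < min_val := by rw [← hg]; exact h2
        have hkey : decide (data[i] < min_val) = true := decide_eq_true hx'
        have hL : countRun data min_val i
            = ((data.drop i).takeWhile (fun y => decide (y < min_val))).length :=
          countRun_eq data min_val data.length i (by omega)
        have hL1 : 1 ≤ countRun data min_val i := countRun_pos data min_val i h1 h2
        have hLle : countRun data min_val i ≤ data.length - i := by
          rw [hL]
          have := (List.takeWhile_sublist (l := data.drop i)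
            (p := fun y => decide (y < min_val))).length_le
          simpa [List.length_drop] using this
        have hq' : (fun y => (decide (y < min_val) == true))
            = (fun y => decide (y < min_val)) := by
          funext y; simp
        have hrest : (data.drop i).dropWhile (fun y => decide (y < min_val))
            = data.drop (i + countRun data min_val i) := by
          rw [dropWhile_eq_drop_len, ← hL, List.drop_drop]
        have hbgo : bGo min_val min_len (data.drop i)
            = List.replicate (countRun data min_val i)
                (if ((countRun data min_val i : Int) > min_len) then (1 : Int) else 0)
              ++ bGo min_val min_len (data.drop (i + countRun data min_val i)) := by
          rw [hdrop, bGo, ← hdrop]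
          simp only [hkey, hq', Bool.true_and, ← hL, hrest]
          simp
        rw [aLoop, dif_pos h1, dif_pos h2, hbgo]
        by_cases hml : ((countRun data min_val i : Int) > min_len)
        · rw [if_pos hml]
          have hset := setOnes_shift (countRun data min_val i) front (data.length - i) hLle
          rw [hf] at hset
          have harr : front ++ List.replicate (countRun data min_val i) (1 : Int)
                ++ List.replicate (data.length - i - countRun data min_val i) 0
              = (front ++ List.replicate (countRun data min_val i) 1)
                ++ List.replicate (data.length - (i + countRun data min_val i)) 0 := by
            have : data.length - i - countRun data min_val i
                = data.length - (i + countRun data min_val i) := by omega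
            simp [this, List.append_assoc]
          rw [hset, harr, ih (i + countRun data min_val i)
            (front ++ List.replicate (countRun data min_val i) 1)
            (by simp [hf]) (by omega) (by omega)]
          simp [hml, List.append_assoc]
        · rw [if_neg hml]
          have hsplit : List.replicate (data.length - i) (0 : Int)
              = List.replicate (countRun data min_val i) 0
                ++ List.replicate (data.length - (i + countRun data min_val i)) 0 := by
            rw [← List.replicate_add]
            congr 1
            omega
          rw [hsplit, ← List.append_assoc, ih (i + countRun data min_val i)
            (front ++ List.replicate (countRun data min_val i) 0)
            (by simp [hf]) (by omega) (by omega)]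
          simp [hml, List.append_assoc]
      · rw [aLoop, dif_pos h1, dif_neg h2]
        have h2' : ¬ data[i] < min_val := by rw [← hg]; exact h2
        have hsplit : front ++ List.replicate (data.length - i) (0 : Int)
            = (front ++ [0]) ++ List.replicate (data.length - (i + 1)) 0 := by
          have : data.length - i = (data.length - (i + 1)) + 1 := by omega
          rw [this, List.replicate_succ]
          simp
        rw [hsplit, ih (i + 1) (front ++ [0]) (by simp [hf]) (by omega) (by omega),
          hdrop, bGo_cons_not min_val min_len _ _ h2']
        simp
    · rw [aLoop, dif_neg h1, List.drop_of_length_le (by omega)]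
      have : data.length - i = 0 := by omega
      simp [this, bGo]

-- ===== alt = bGo =====

-- the value of prev after scanning a list (left fold of the DP step)
def prevAfter (min_val : Int) (p : Int) : List Int → Int
  | [] => p
  | x :: xs => prevAfter min_val (if x < min_val then p + 1 else 0) xs

theorem scanRuns_append (min_val p : Int) (l1 l2 : List Int) :
    scanRuns min_val p (l1 ++ l2)
      = scanRuns min_val p l1 ++ scanRuns min_val (prevAfter min_val p l1) l2 := by
  induction l1 generalizing p with
  | nil => simp [scanRuns, prevAfter]
  | cons x xs ih => simp [scanRuns, prevAfter, ih]

theorem prevAfter_append (min_val p : Int) (l1 l2 : List Int) :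
    prevAfter min_val p (l1 ++ l2) = prevAfter min_val (prevAfter min_val p l1) l2 := by
  induction l1 generalizing p with
  | nil => simp [prevAfter]
  | cons x xs ih => simp [prevAfter, ih]

theorem scanRuns_prev_irrel (min_val p q x : Int) (xs : List Int) (hx : ¬ x < min_val) :
    scanRuns min_val p (x :: xs) = scanRuns min_val q (x :: xs) := by
  simp [scanRuns, hx]

theorem scanRuns_all_below (min_val : Int) (run : List Int)
    (h : ∀ y ∈ run, y < min_val) (p : Int) :
    scanRuns min_val p run = (List.range run.length).map (fun k : Nat => p + (k : Int) + 1) := by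
  induction run generalizing p with
  | nil => simp [scanRuns]
  | cons x xs ih =>
    have hx : x < min_val := h x (by simp)
    rw [scanRuns]
    simp only [if_pos hx]
    rw [ih (fun y hy => h y (by simp [hy])) (p + 1), List.length_cons,
      List.range_succ_eq_map, List.map_cons, List.map_map]
    refine List.cons_eq_cons.mpr ⟨by norm_num, ?_⟩
    apply List.map_congr_left
    intro a _
    simp [Function.comp]
    ring

theorem scanRuns_zero_below (min_val : Int) (run : List Int)
    (h : ∀ y ∈ run, y < min_val) :
    scanRuns min_val 0 run = (List.range run.length).map (fun k : Nat => (k : Int) + 1) := by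
  rw [scanRuns_all_below min_val run h 0]
  apply List.map_congr_left
  intro a _
  ring

theorem scanRuns_none_below (min_val : Int) (run : List Int)
    (h : ∀ y ∈ run, ¬ y < min_val) (p : Int) :
    scanRuns min_val p run = List.replicate run.length 0 := by
  induction run generalizing p with
  | nil => simp [scanRuns]
  | cons x xs ih =>
    have hx : ¬ x < min_val := h x (by simp)
    rw [scanRuns]
    simp only [if_neg hx]
    rw [ih (fun y hy => h y (by simp [hy])) 0, List.length_cons]
    simp [List.replicate_succ]

theorem prevAfter_none_below (min_val : Int) (run : List Int)
    (h : ∀ y ∈ run, ¬ y < min_val) :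
    prevAfter min_val 0 run = 0 := by
  induction run with
  | nil => rfl
  | cons x xs ih =>
    have hx : ¬ x < min_val := h x (by simp)
    rw [prevAfter, if_neg hx]
    exact ih (fun y hy => h y (by simp [hy]))

-- combined map over a true run
theorem run_true_block (min_val min_len : Int) (run : List Int)
    (h : ∀ y ∈ run, y < min_val) :
    (run.zip ((((List.range run.length).map (fun k : Nat => (k : Int) + 1))).zip
        ((((List.range run.length).map (fun k : Nat => (k : Int) + 1))).reverse))).map
      (fun p => if p.1 < min_val ∧ p.2.1 + p.2.2 - 1 > min_len then (1 : Int) else 0)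
      = List.replicate run.length (if (run.length : Int) > min_len then (1 : Int) else 0) := by
  apply List.ext_getElem
  · simp
  · intro i h1 h2
    have hi : i < run.length := by simp at h2; omega
    have hrun : run[i] < min_val := h run[i] (List.getElem_mem hi)
    simp [List.getElem_reverse, hrun]
    have hcast : ((run.length - 1 - i : Nat) : Int) = (run.length : Int) - 1 - i := by omega
    rw [hcast]
    by_cases hml : (run.length : Int) > min_len
    · rw [if_pos hml, if_pos (by omega)]
    · rw [if_neg hml, if_neg (by omega)]

theorem run_false_block (min_val min_len : Int) (run : List Int)
    (h : ∀ y ∈ run, ¬ y < min_val) :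
    (run.zip ((List.replicate run.length (0 : Int)).zip
        (List.replicate run.length (0 : Int)))).map
      (fun p => if p.1 < min_val ∧ p.2.1 + p.2.2 - 1 > min_len then (1 : Int) else 0)
      = List.replicate run.length (0 : Int) := by
  apply List.ext_getElem
  · simp
  · intro i h1 h2
    have hi : i < run.length := by simp at h2; omega
    have hrun : ¬ run[i] < min_val := h run[i] (List.getElem_mem hi)
    simp [hrun]

def altMap (min_val min_len : Int) (l : List Int) : List Int :=
  (l.zip ((scanRuns min_val 0 l).zip ((scanRuns min_val 0 l.reverse).reverse))).map
    (fun p => if p.1 < min_val ∧ p.2.1 + p.2.2 - 1 > min_len then (1 : Int) else 0)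

theorem dropWhile_head_false (p : Int → Bool) : ∀ (l : List Int) (h : Int) (t : List Int),
    l.dropWhile p = h :: t → p h = false := by
  intro l
  induction l with
  | nil => intro h t hc; simp at hc
  | cons x xs ih =>
    intro h t hc
    by_cases hp : p x
    · rw [List.dropWhile_cons_of_pos hp] at hc
      exact ih _ _ hc
    · rw [List.dropWhile_cons_of_neg hp] at hc
      cases hc
      simpa using hp

theorem scanRuns_rest_irrel (min_val p : Int) (key : Bool) (rest : List Int)
    (hrest : ∀ h t, rest = h :: t → decide (h < min_val) = !key) (hkey : key = true) :
    scanRuns min_val p rest = scanRuns min_val 0 rest := by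
  cases rest with
  | nil => rfl
  | cons h t =>
    have hh := hrest h t rfl
    rw [hkey] at hh
    have : ¬ h < min_val := by simpa using hh
    exact scanRuns_prev_irrel min_val p 0 h t this

theorem prevAfter_rev_zero (min_val : Int) (key : Bool) (rest : List Int)
    (hrest : ∀ h t, rest = h :: t → decide (h < min_val) = !key) (hkey : key = true) :
    prevAfter min_val 0 rest.reverse = 0 := by
  cases rest with
  | nil => rfl
  | cons h t =>
    have hh := hrest h t rfl
    rw [hkey] at hh
    have hnot : ¬ h < min_val := by simpa using hh
    rw [List.reverse_cons, prevAfter_append, prevAfter, prevAfter, if_neg hnot]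

theorem block_decomp (min_val min_len : Int) (key : Bool) (run rest : List Int)
    (hrun : ∀ y ∈ run, decide (y < min_val) = key)
    (hrest : ∀ h t, rest = h :: t → decide (h < min_val) = !key) :
    altMap min_val min_len (run ++ rest)
      = List.replicate run.length
          (if key && decide ((run.length : Int) > min_len) then (1 : Int) else 0)
        ++ altMap min_val min_len rest := by
  cases hkey : key with
  | true =>
    have hbelow : ∀ y ∈ run, y < min_val := by
      intro y hy
      have := hrun y hy
      rw [hkey] at this
      simpa using this
    have hbelowR : ∀ y ∈ run.reverse, y < min_val := by
      intro y hy
      exact hbelow y (List.mem_reverse.mp hy)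
    have hLrun : scanRuns min_val 0 run
        = (List.range run.length).map (fun j : Nat => (j : Int) + 1) := scanRuns_zero_below _ _ hbelow
    have hRrun : scanRuns min_val 0 run.reverse
        = (List.range run.length).map (fun j : Nat => (j : Int) + 1) := by
      rw [scanRuns_zero_below _ _ hbelowR, List.length_reverse]
    have hfwd : scanRuns min_val 0 (run ++ rest)
        = (List.range run.length).map (fun j : Nat => (j : Int) + 1) ++ scanRuns min_val 0 rest := by
      rw [scanRuns_append, hLrun, scanRuns_rest_irrel min_val _ key rest hrest hkey]
    have hbwd : (scanRuns min_val 0 (run ++ rest).reverse).reverse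
        = ((List.range run.length).map (fun j : Nat => (j : Int) + 1)).reverse
          ++ (scanRuns min_val 0 rest.reverse).reverse := by
      rw [List.reverse_append, scanRuns_append,
        prevAfter_rev_zero min_val key rest hrest hkey, hRrun, List.reverse_append]
    unfold altMap
    rw [hfwd, hbwd,
      List.zip_append (by simp),
      List.zip_append (by simp),
      List.map_append, run_true_block min_val min_len run hbelow]
    simp
  | false =>
    have habove : ∀ y ∈ run, ¬ y < min_val := by
      intro y hy
      have := hrun y hy
      rw [hkey] at this
      simpa using this
    have haboveR : ∀ y ∈ run.reverse, ¬ y < min_val := by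
      intro y hy
      exact habove y (List.mem_reverse.mp hy)
    have hfwd : scanRuns min_val 0 (run ++ rest)
        = List.replicate run.length 0 ++ scanRuns min_val 0 rest := by
      rw [scanRuns_append, scanRuns_none_below _ _ habove, prevAfter_none_below _ _ habove]
    have hbwd : (scanRuns min_val 0 (run ++ rest).reverse).reverse
        = List.replicate run.length 0 ++ (scanRuns min_val 0 rest.reverse).reverse := by
      rw [List.reverse_append, scanRuns_append, scanRuns_none_below _ _ haboveR,
        List.reverse_append, List.length_reverse, List.reverse_replicate]
    unfold altMap
    rw [hfwd, hbwd,
      List.zip_append (by simp),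
      List.zip_append (by simp),
      List.map_append, run_false_block min_val min_len run habove]
    simp
  
theorem alt_eq_bGo (min_val min_len : Int) :
    ∀ k (l : List Int), l.length ≤ k →
      altMap min_val min_len l = bGo min_val min_len l := by
  intro k
  induction k with
  | zero =>
    intro l hl
    have h0 : l = [] := by
      cases l with
      | nil => rfl
      | cons a b => simp at hl
    subst h0
    simp [altMap, scanRuns, bGo]
  | succ k ih =>
    intro l hl
    cases l with
    | nil => simp [altMap, scanRuns, bGo]
    | cons x xs =>
      have hPx : (fun y => decide (y < min_val) == decide (x < min_val)) x = true := by simp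
      have hsplit := List.takeWhile_append_dropWhile
        (p := fun y => decide (y < min_val) == decide (x < min_val)) (l := x :: xs)
      have hrun : ∀ y ∈ (x :: xs).takeWhile (fun y => decide (y < min_val) == decide (x < min_val)),
          decide (y < min_val) = decide (x < min_val) := by
        intro y hy
        have := List.mem_takeWhile_imp hy
        simpa using this
      have hrest : ∀ h t,
          (x :: xs).dropWhile (fun y => decide (y < min_val) == decide (x < min_val)) = h :: t →
          decide (h < min_val) = !(decide (x < min_val)) := by
        intro h t ht
        have := dropWhile_head_false _ _ _ _ ht
        cases hxk : decide (x < min_val) <;> cases hhk : decide (h < min_val) <;> simp_all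
      have hlen : ((x :: xs).dropWhile (fun y => decide (y < min_val) == decide (x < min_val))).length ≤ k := by
        have h3 : (x :: xs).dropWhile (fun y => decide (y < min_val) == decide (x < min_val))
            = xs.dropWhile (fun y => decide (y < min_val) == decide (x < min_val)) :=
          List.dropWhile_cons_of_pos hPx
        rw [h3]
        have h4 := List.length_dropWhile_le (fun y => decide (y < min_val) == decide (x < min_val)) xs
        simp at hl
        omega
      calc altMap min_val min_len (x :: xs)
          = altMap min_val min_len
              ((x :: xs).takeWhile (fun y => decide (y < min_val) == decide (x < min_val))
                ++ (x :: xs).dropWhile (fun y => decide (y < min_val) == decide (x < min_val))) := by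
            rw [hsplit]
        _ = _ := by
            rw [block_decomp min_val min_len (decide (x < min_val)) _ _ hrun hrest,
              ih _ hlen, bGo]

-- ===== VERDICT =====
theorem identify_anomalies_spec : Claim_equal_identify_anomalies := by
  intro data mv ml _
  unfold Spec_identify_anomalies identify_anomalies identify_anomalies_alt
  have hA := aLoop_bGo data mv ml data.length 0 [] rfl (Nat.zero_le _) (by omega)
  have hB := alt_eq_bGo mv ml data.length data (le_refl _)
  unfold altMap at hB
  simp at hA
  rw [← hA] at hB
  exact hB.symm
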